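-- pv_equiv track=rewrite | github.com/loghmanb/daily-coding-problem | uber_pyramid.py | find_min_cost_to_make_pyramid
-- ===== SOURCE A (Python) =====
-- def find_min_cost_to_make_pyramid(arr):
--     N = len(arr)
--     summit = [0] * N
--     cost = 0
--
--     if N<3: return None
--
--     top_idx = 0
--     top_val = 0
--     for i in range(N):
--         pre_el = 0 if i==0 else arr[i-1]
--         next_el = 0 if i==N-1 else arr[i+1]
--
--         summit[i] = min(arr[i], 1 + min(pre_el, next_el))
--
--         if summit[i]>top_val:
--             top_idx = i
--             top_val = summit[i]
--
--     for i in range(N):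
--         summit[i] = max(top_val - abs(top_idx - i), 0)
--         cost += arr[i] - summit[i]
--
--     return cost
-- ===== SOURCE B (Python) =====
-- def find_min_cost_to_make_pyramid(arr):
--     n = len(arr)
--     if n < 3:
--         return None
--
--     # single argmax scan (strict '>' keeps the earliest index); no summit array
--     top_idx = 0
--     top_val = 0
--     for i in range(n):
--         left = arr[i - 1] if i > 0 else 0
--         right = arr[i + 1] if i < n - 1 else 0
--         s = min(arr[i], 1 + min(left, right))
--         if s > top_val:
--             top_idx, top_val = i, s
--
--     # pyramid total in closed form: centre top_val plus a clipped arithmetic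
--     # series top_val-1, top_val-2, ... on each side (k terms, k = min(side length, top_val-1))
--     def side(length):
--         k = min(length, top_val - 1)
--         return k * top_val - k * (k + 1) // 2 if k > 0 else 0
--
--     pyramid = top_val + side(top_idx) + side(n - 1 - top_idx)
--     return sum(arr) - pyramid
-- ===== Notes on version B (the rewrite author's own statement) =====
-- stated objective: faster
-- what changed: B drops A's second per-index pass and the summit scratch array: after the single argmax scan it computes the answer in closed form as sum(arr) minus a triangular-number formula for the clipped pyramid total on each side of the summit.
import Mathlib
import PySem

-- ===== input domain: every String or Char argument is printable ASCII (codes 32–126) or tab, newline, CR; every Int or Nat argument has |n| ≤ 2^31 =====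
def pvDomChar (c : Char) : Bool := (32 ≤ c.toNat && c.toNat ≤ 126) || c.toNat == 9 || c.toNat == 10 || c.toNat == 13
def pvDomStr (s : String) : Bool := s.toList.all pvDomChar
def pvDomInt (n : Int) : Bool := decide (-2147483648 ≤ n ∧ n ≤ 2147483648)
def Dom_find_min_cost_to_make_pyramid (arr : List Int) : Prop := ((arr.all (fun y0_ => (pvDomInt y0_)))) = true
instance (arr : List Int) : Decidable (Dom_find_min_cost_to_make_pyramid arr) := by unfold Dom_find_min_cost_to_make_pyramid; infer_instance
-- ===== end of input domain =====

-- B replaces A's second per-index pass by a closed-form (triangular-number) pyramid sum; same return value, A is total.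

-- ===== PORT A =====
-- All list indices below are guarded to be in range by the surrounding ifs, so pyGetD/pySetD are exact.
def find_min_cost_to_make_pyramid (arr : List Int) : Option Int :=
  let N : Int := arr.length
  if N < 3 then none
  else
    let st1 :=
      (PySem.List.pyRange 0 N 1).foldl
        (fun (st : List Int × Int × Int) i =>
          let pre_el : Int := if i = 0 then 0 else PySem.List.pyGetD arr (i - 1) 0
          let next_el : Int := if i = N - 1 then 0 else PySem.List.pyGetD arr (i + 1) 0
          let s := min (PySem.List.pyGetD arr i 0) (1 + min pre_el next_el)
          if s > st.2.2 then (PySem.List.pySetD st.1 i s, i, s)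
          else (PySem.List.pySetD st.1 i s, st.2.1, st.2.2))
        (List.replicate arr.length 0, 0, 0)
    let st2 :=
      (PySem.List.pyRange 0 N 1).foldl
        (fun (st : List Int × Int) i =>
          let s := max (st1.2.2 - |st1.2.1 - i|) 0
          (PySem.List.pySetD st.1 i s, st.2 + (PySem.List.pyGetD arr i 0 - s)))
        (st1.1, 0)
    some st2.2

-- ===== PORT B =====
def pyramidSide (top_val L : Int) : Int :=
  let k := min L (top_val - 1)
  if k > 0 then k * top_val - PySem.Int.floordiv (k * (k + 1)) 2 else 0

def find_min_cost_to_make_pyramid_alt (arr : List Int) : Option Int :=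
  let n : Int := arr.length
  if n < 3 then none
  else
    let pt :=
      (PySem.List.pyRange 0 n 1).foldl
        (fun (p : Int × Int) i =>
          let left : Int := if 0 < i then PySem.List.pyGetD arr (i - 1) 0 else 0
          let right : Int := if i < n - 1 then PySem.List.pyGetD arr (i + 1) 0 else 0
          let s := min (PySem.List.pyGetD arr i 0) (1 + min left right)
          if s > p.2 then (i, s) else p)
        (0, 0)
    some (arr.sum - (pt.2 + pyramidSide pt.2 pt.1 + pyramidSide pt.2 (n - 1 - pt.1)))

-- ===== PRECONDITION & SPEC =====
-- A is total (all indexing is guarded), so there is no Pre_.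
def Spec_find_min_cost_to_make_pyramid (arr : List Int) (out : Option Int) : Prop := out = find_min_cost_to_make_pyramid_alt arr
instance (arr : List Int) (out : Option Int) : Decidable (Spec_find_min_cost_to_make_pyramid arr out) := by unfold Spec_find_min_cost_to_make_pyramid; infer_instance

-- ===== CLAIM (what is proved, stated in full; the proofs are below) =====
def Claim_equal_find_min_cost_to_make_pyramid : Prop := ∀ (arr : List Int), Dom_find_min_cost_to_make_pyramid arr → Spec_find_min_cost_to_make_pyramid arr (find_min_cost_to_make_pyramid arr)

-- ===== LEMMAS AND PROOFS =====

def gRec (t : Int) : Nat → Int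
  | 0 => 0
  | L + 1 => gRec t L + max (t - (L + 1)) 0

theorem gRec_eq_side (t : Int) (ht : 0 ≤ t) : ∀ L : Nat, gRec t L = pyramidSide t (L : Int) := by
  intro L
  induction L with
  | zero =>
    have : ¬ ((0 : Int) < min 0 (t - 1)) := by omega
    simp [gRec, pyramidSide, this]
  | succ L ih =>
    unfold gRec
    rw [ih]
    unfold pyramidSide
    push_cast
    simp only [PySem.Int.floordiv_eq_ediv_of_pos (show (0:Int) < 2 by norm_num)]
    by_cases h1 : (t - 1 : Int) ≤ L
    · have hmax : max (t - ((L : Int) + 1)) 0 = 0 := by omega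
      have hmin : min ((L : Int) + 1) (t - 1) = min (L : Int) (t - 1) := by omega
      rw [hmax, hmin, add_zero]
    · have hmax : max (t - ((L : Int) + 1)) 0 = t - ((L : Int) + 1) := by omega
      have hmin' : min ((L : Int) + 1) (t - 1) = (L : Int) + 1 := by omega
      rw [hmax, hmin']
      rcases Nat.eq_zero_or_pos L with hL | hL
      · subst hL
        have h0 : ¬ ((0 : Int) < min 0 (t - 1)) := by omega
        norm_num [h0]
      · have hminL : min (L : Int) (t - 1) = (L : Int) := by omega
        rw [hminL]
        have hgt : ((L : Int)) > 0 := by exact_mod_cast hL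
        have hgt1 : ((L : Int) + 1) > 0 := by omega
        rw [if_pos hgt, if_pos hgt1]
        have hdiv : ((L : Int) + 1) * (((L : Int) + 1) + 1) / 2 = (L : Int) * ((L : Int) + 1) / 2 + ((L : Int) + 1) := by
          rw [show ((L:Int)+1)*(((L:Int)+1)+1) = (L:Int)*((L:Int)+1) + ((L:Int)+1)*2 by ring,
              Int.add_mul_ediv_right _ _ (by norm_num)]
        rw [hdiv]
        generalize (L : Int) * ((L : Int) + 1) / 2 = X
        ring

theorem loop1_eq (arr : List Int) (N : Int) :
    ∀ (l : List Int) (summ : List Int) (p t : Int), (∀ i ∈ l, 0 ≤ i ∧ i < N) →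
    (l.foldl
      (fun (st : List Int × Int × Int) i =>
        let pre_el : Int := if i = 0 then 0 else PySem.List.pyGetD arr (i - 1) 0
        let next_el : Int := if i = N - 1 then 0 else PySem.List.pyGetD arr (i + 1) 0
        let s := min (PySem.List.pyGetD arr i 0) (1 + min pre_el next_el)
        if s > st.2.2 then (PySem.List.pySetD st.1 i s, i, s)
        else (PySem.List.pySetD st.1 i s, st.2.1, st.2.2)) (summ, p, t)).2
    = l.foldl
      (fun (pr : Int × Int) i =>
        let left : Int := if 0 < i then PySem.List.pyGetD arr (i - 1) 0 else 0
        let right : Int := if i < N - 1 then PySem.List.pyGetD arr (i + 1) 0 else 0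
        let s := min (PySem.List.pyGetD arr i 0) (1 + min left right)
        if s > pr.2 then (i, s) else pr) (p, t) := by
  intro l
  induction l with
  | nil => intro summ p t _; rfl
  | cons i l ih =>
    intro summ p t h
    obtain ⟨hi0, hiN⟩ := h i (by simp)
    have h' : ∀ j ∈ l, 0 ≤ j ∧ j < N := fun j hj => h j (by simp [hj])
    simp only [List.foldl_cons]
    have hpre : (if i = 0 then (0:Int) else PySem.List.pyGetD arr (i - 1) 0)
        = (if 0 < i then PySem.List.pyGetD arr (i - 1) 0 else 0) := by
      split_ifs <;> first | rfl | omega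
    have hnext : (if i = N - 1 then (0:Int) else PySem.List.pyGetD arr (i + 1) 0)
        = (if i < N - 1 then PySem.List.pyGetD arr (i + 1) 0 else 0) := by
      split_ifs <;> first | rfl | omega
    rw [hpre, hnext]
    split_ifs <;> exact ih _ _ _ h'

theorem loop1_inv (arr : List Int) (N : Int) :
    ∀ (l : List Int), (∀ i ∈ l, 0 ≤ i ∧ i < N) → ∀ (p t : Int), 0 ≤ p → p < N → 0 ≤ t →
    (0 ≤ (l.foldl
      (fun (pr : Int × Int) i =>
        let left : Int := if 0 < i then PySem.List.pyGetD arr (i - 1) 0 else 0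
        let right : Int := if i < N - 1 then PySem.List.pyGetD arr (i + 1) 0 else 0
        let s := min (PySem.List.pyGetD arr i 0) (1 + min left right)
        if s > pr.2 then (i, s) else pr) (p, t)).1 ∧
     (l.foldl
      (fun (pr : Int × Int) i =>
        let left : Int := if 0 < i then PySem.List.pyGetD arr (i - 1) 0 else 0
        let right : Int := if i < N - 1 then PySem.List.pyGetD arr (i + 1) 0 else 0
        let s := min (PySem.List.pyGetD arr i 0) (1 + min left right)
        if s > pr.2 then (i, s) else pr) (p, t)).1 < N ∧
     0 ≤ (l.foldl
      (fun (pr : Int × Int) i =>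
        let left : Int := if 0 < i then PySem.List.pyGetD arr (i - 1) 0 else 0
        let right : Int := if i < N - 1 then PySem.List.pyGetD arr (i + 1) 0 else 0
        let s := min (PySem.List.pyGetD arr i 0) (1 + min left right)
        if s > pr.2 then (i, s) else pr) (p, t)).2) := by
  intro l
  induction l with
  | nil => intro _ p t h1 h2 h3; exact ⟨h1, h2, h3⟩
  | cons i l ih =>
    intro h p t h1 h2 h3
    obtain ⟨hi0, hiN⟩ := h i (by simp)
    have h' : ∀ j ∈ l, 0 ≤ j ∧ j < N := fun j hj => h j (by simp [hj])
    simp only [List.foldl_cons]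
    set s := min (PySem.List.pyGetD arr i 0) (1 + min (if 0 < i then PySem.List.pyGetD arr (i - 1) 0 else 0) (if i < N - 1 then PySem.List.pyGetD arr (i + 1) 0 else 0)) with hsdef
    by_cases hs : s > t
    · rw [if_pos hs]
      exact ih h' _ _ hi0 hiN (by omega)
    · rw [if_neg hs]
      exact ih h' _ _ h1 h2 h3

theorem gRec_succ (t : Int) (L : Nat) : gRec t (L + 1) = gRec t L + max (t - ((L:Int) + 1)) 0 := rfl

theorem right_sum (t p : Int) : ∀ L : Nat,
    ((PySem.List.pyRange (p + 1) (p + 1 + L) 1).map (fun i => max (t - |p - i|) 0)).sum = gRec t L := by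
  intro L
  induction L with
  | zero =>
    rw [show p + 1 + ((0:Nat):Int) = p + 1 by push_cast; ring,
        PySem.List.pyRange_one_eq_nil (le_refl _)]
    rfl
  | succ L ih =>
    rw [show p + 1 + ((L+1:Nat):Int) = (p + 1 + (L:Int)) + 1 by push_cast; ring,
        PySem.List.pyRange_one_succ_right (by omega)]
    rw [List.map_append, List.sum_append, ih]
    have habs : |p - (p + 1 + (L:Int))| = (L:Int) + 1 := by
      rw [show p - (p + 1 + (L:Int)) = -((L:Int)+1) by ring, abs_neg, abs_of_nonneg (by positivity)]
    simp only [List.map_cons, List.map_nil, List.sum_cons, List.sum_nil, habs, gRec_succ, add_zero]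

theorem left_sum (t : Int) : ∀ (L : Nat) (c : Int),
    ((PySem.List.pyRange c (c + L) 1).map (fun i => max (t - ((c + L) - i)) 0)).sum = gRec t L := by
  intro L
  induction L with
  | zero =>
    intro c
    rw [show c + ((0:Nat):Int) = c by push_cast; ring, PySem.List.pyRange_one_eq_nil (le_refl _)]
    rfl
  | succ L ih =>
    intro c
    rw [PySem.List.pyRange_one_cons (by push_cast; omega)]
    simp only [List.map_cons, List.sum_cons]
    have htail : ((PySem.List.pyRange (c+1) (c + ((L+1:Nat):Int)) 1).map (fun i => max (t - ((c + ((L+1:Nat):Int)) - i)) 0)).sum = gRec t L := by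
      have := ih (c + 1)
      rw [show (c+1) + ((L:Nat):Int) = c + ((L+1:Nat):Int) by push_cast; ring] at this
      exact this
    rw [htail, show c + ((L+1:Nat):Int) - c = (L:Int) + 1 by push_cast; ring, gRec_succ]
    exact add_comm _ _

theorem pyr_sum (t p N : Int) (ht : 0 ≤ t) (hp0 : 0 ≤ p) (hpN : p < N) :
    ((PySem.List.pyRange 0 N 1).map (fun i => max (t - |p - i|) 0)).sum
    = t + pyramidSide t p + pyramidSide t (N - 1 - p) := by
  have hp' : ((p.toNat : Int)) = p := Int.toNat_of_nonneg hp0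
  have hq' : (((N - 1 - p).toNat : Int)) = N - 1 - p := Int.toNat_of_nonneg (by omega)
  rw [PySem.List.pyRange_one_append 0 p N hp0 (le_of_lt hpN), List.map_append, List.sum_append,
      PySem.List.pyRange_one_cons hpN]
  simp only [List.map_cons, List.sum_cons]
  have hmid : max (t - |p - p|) 0 = t := by
    rw [sub_self, abs_zero, sub_zero]; exact max_eq_left ht
  have hL0 := left_sum t p.toNat 0
  rw [zero_add, hp'] at hL0
  have hLcongr : (PySem.List.pyRange 0 p 1).map (fun i => max (t - |p - i|) 0)
      = (PySem.List.pyRange 0 p 1).map (fun i => max (t - (p - i)) 0) := by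
    apply List.map_congr_left
    intro i hi
    rw [PySem.List.mem_pyRange_one] at hi
    rw [abs_of_nonneg (by omega)]
  have hR := right_sum t p ((N - 1 - p).toNat)
  rw [hq', show p + 1 + (N - 1 - p) = N by ring] at hR
  rw [hmid, hLcongr, hL0, hR,
      gRec_eq_side t ht p.toNat, gRec_eq_side t ht (N - 1 - p).toNat, hp', hq']
  ring

theorem sum_map_sub_int (l : List Int) (f g : Int → Int) :
    (l.map (fun i => f i - g i)).sum = (l.map f).sum - (l.map g).sum := by
  induction l with
  | nil => simp
  | cons x l ih => simp [ih]; ring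

theorem loop2_eq (arr : List Int) (P T : Int) (sm : List Int)
    (ht : 0 ≤ T) (hp0 : 0 ≤ P) (hpN : P < ((arr.length : Int))) :
    ((PySem.List.pyRange 0 ((arr.length : Int)) 1).foldl
      (fun (st : List Int × Int) i =>
        let s := max (T - |P - i|) 0
        (PySem.List.pySetD st.1 i s, st.2 + (PySem.List.pyGetD arr i 0 - s))) (sm, 0)).2
    = arr.sum - (T + pyramidSide T P + pyramidSide T (((arr.length : Int)) - 1 - P)) := by
  rw [PySem.List.foldl_prod_mk (f := fun sm i => PySem.List.pySetD sm i (max (T - |P - i|) 0))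
      (g := fun c i => c + (PySem.List.pyGetD arr i 0 - max (T - |P - i|) 0))]
  dsimp only
  rw [PySem.List.foldl_add (g := fun i => PySem.List.pyGetD arr i 0 - max (T - |P - i|) 0), zero_add]
  rw [sum_map_sub_int, PySem.List.map_pyGetD_pyRange_zero', pyr_sum T P ((arr.length : Int)) ht hp0 hpN]

theorem port_eq (arr : List Int) : find_min_cost_to_make_pyramid arr = find_min_cost_to_make_pyramid_alt arr := by
  unfold find_min_cost_to_make_pyramid find_min_cost_to_make_pyramid_alt
  by_cases h3 : ((arr.length : Int)) < 3
  · simp only [if_pos h3]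
  · simp only [if_neg h3]
    have hmem : ∀ i ∈ PySem.List.pyRange 0 ((arr.length : Int)) 1, 0 ≤ i ∧ i < ((arr.length : Int)) := by
      intro i hi; rw [PySem.List.mem_pyRange_one] at hi; exact ⟨hi.1, hi.2⟩
    obtain ⟨hP0, hPN, hT0⟩ := loop1_inv arr ((arr.length : Int)) _ hmem 0 0 (le_refl 0) (by omega) (le_refl 0)
    rw [loop1_eq arr ((arr.length : Int)) _ _ _ _ hmem]
    exact congrArg some (loop2_eq arr _ _ _ hT0 hP0 hPN)

-- ===== VERDICT (by name: the statement is the Claim_ definition above) =====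
theorem find_min_cost_to_make_pyramid_spec : Claim_equal_find_min_cost_to_make_pyramid := by
  intro arr _
  unfold Spec_find_min_cost_to_make_pyramid
  exact port_eq arr
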